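-- pv_equiv track=rewrite | github.com/DragonKyro/python-arcade | games/picross.py | _check_line
-- ===== SOURCE A (Python) =====
-- def _check_line(player_line, clue):
--     """Check if a player's line (list of 0/1) matches the clue."""
--     groups = []
--     count = 0
--     for v in player_line:
--         if v == 1:
--             count += 1
--         else:
--             if count > 0:
--                 groups.append(count)
--             count = 0
--     if count > 0:
--         groups.append(count)
--     if not groups:
--         groups = [0]
--     return groups == clue
-- ===== SOURCE B (Python) =====
-- def _check_line(player_line, clue):
--     """Check if a player's line (list of 0/1) matches the clue."""
--     if 1 not in player_line:
--         return clue == [0]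
--     return _match(player_line, clue)
--
-- def _match(line, clue):
--     # skip leading non-1 cells
--     k = 0
--     while k < len(line) and line[k] != 1:
--         k += 1
--     line = line[k:]
--     if not clue:
--         return not line
--     if not line:
--         return False
--     run = 0
--     while run < len(line) and line[run] == 1:
--         run += 1
--     return run == clue[0] and _match(line[run:], clue[1:])
-- ===== Notes on version B (the rewrite author's own statement) =====
-- stated objective: alternative
-- what changed: B never builds the run-length list: it verifies the clue directly against the line with a recursive matcher that consumes one clue entry and one maximal 1-run per step (plus a separate empty-line check), instead of A's build-groups-then-compare pass.
import Mathlib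
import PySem

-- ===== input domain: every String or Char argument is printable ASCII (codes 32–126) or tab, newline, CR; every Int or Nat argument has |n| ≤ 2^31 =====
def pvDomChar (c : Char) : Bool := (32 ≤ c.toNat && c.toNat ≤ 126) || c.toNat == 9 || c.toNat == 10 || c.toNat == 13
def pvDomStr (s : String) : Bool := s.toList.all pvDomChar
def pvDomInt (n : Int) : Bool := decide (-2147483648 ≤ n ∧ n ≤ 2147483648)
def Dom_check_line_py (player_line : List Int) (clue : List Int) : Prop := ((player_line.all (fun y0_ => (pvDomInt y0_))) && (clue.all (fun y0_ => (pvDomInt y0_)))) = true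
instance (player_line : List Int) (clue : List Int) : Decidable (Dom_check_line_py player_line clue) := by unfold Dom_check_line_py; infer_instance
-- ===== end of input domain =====

-- B never builds the run-length list: it checks the clue directly against the line with a
-- recursive matcher consuming one clue entry and one maximal 1-run per step (alternative decomposition).

-- ===== PORT A =====
def check_line_py (player_line : List Int) (clue : List Int) : Bool :=
  let st := player_line.foldl (fun (s : List Int × Int) v =>
    if v = 1 then (s.1, s.2 + 1)
    else ((if s.2 > 0 then s.1 ++ [s.2] else s.1), 0)) ([], 0)
  let groups := if st.2 > 0 then st.1 ++ [st.2] else st.1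
  let groups := if groups = [] then [0] else groups
  groups == clue

-- ===== PORT B =====
-- _match: drop leading non-1 cells, then the next clue entry must equal the length of the
-- leading 1-run; recurse on the rest of both.
def matchRuns : List Int → List Int → Bool
  | line, [] => (line.dropWhile (fun v => !(v == 1))).isEmpty
  | line, c :: cs =>
      let l := line.dropWhile (fun v => !(v == 1))
      if l.isEmpty then false
      else (((l.takeWhile (· == 1)).length : Int) == c) && matchRuns (l.dropWhile (· == 1)) cs

def check_line_py_alt (player_line : List Int) (clue : List Int) : Bool :=
  if !(player_line.contains 1) then clue == [0]
  else matchRuns player_line clue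

-- ===== PRECONDITION & SPEC =====
def Spec_check_line_py (player_line : List Int) (clue : List Int) (out : Bool) : Prop := out = check_line_py_alt player_line clue
instance (player_line : List Int) (clue : List Int) (out : Bool) : Decidable (Spec_check_line_py player_line clue out) := by unfold Spec_check_line_py; infer_instance

-- ===== CLAIM (what is proved, stated in full; the proofs are below) =====
def Claim_equal_check_line_py : Prop := ∀ (player_line : List Int) (clue : List Int), Dom_check_line_py player_line clue → Spec_check_line_py player_line clue (check_line_py player_line clue)

-- ===== LEMMAS AND PROOFS =====

-- the lengths of the maximal 1-runs of l, given a pending run of length c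
def onesRuns (c : Int) : List Int → List Int
  | [] => if c > 0 then [c] else []
  | v :: t => if v = 1 then onesRuns (c + 1) t else (if c > 0 then [c] else []) ++ onesRuns 0 t

lemma foldA_eq_onesRuns (l : List Int) : ∀ (acc : List Int) (c : Int),
    (let st := l.foldl (fun (s : List Int × Int) v =>
        if v = 1 then (s.1, s.2 + 1)
        else ((if s.2 > 0 then s.1 ++ [s.2] else s.1), 0)) (acc, c)
     if st.2 > 0 then st.1 ++ [st.2] else st.1) = acc ++ onesRuns c l := by
  induction l with
  | nil =>
      intro acc c
      simp only [List.foldl_nil, onesRuns]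
      split_ifs <;> simp
  | cons v t ih =>
      intro acc c
      simp only [List.foldl_cons, onesRuns]
      by_cases hv : v = 1
      · simp only [hv, ite_true]
        exact ih acc (c + 1)
      · simp only [if_neg hv]
        rw [ih]
        split_ifs <;> simp

lemma onesRuns_pos (t : List Int) : ∀ (c : Int), 0 < c →
    onesRuns c t = (c + ((t.takeWhile (· == (1 : Int))).length : Int)) :: onesRuns 0 (t.dropWhile (· == (1 : Int))) := by
  induction t with
  | nil => intro c hc; simp [onesRuns, hc]
  | cons v t ih =>
      intro c hc
      by_cases hv : v = 1
      · subst hv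
        simp only [onesRuns, List.takeWhile_cons, List.dropWhile_cons,
          beq_self_eq_true, if_pos, List.length_cons]
        rw [ih (c + 1) (by omega)]
        congr 1
        push_cast
        ring
      · have hvb : ((v == (1 : Int)) = false) := by simpa using hv
        simp [onesRuns, hv, hvb, hc]

-- dropping leading non-1 cells does not change the 1-runs
lemma onesRuns_dropNonOnes (line : List Int) :
    onesRuns 0 (line.dropWhile (fun v => !(v == 1))) = onesRuns 0 line := by
  induction line with
  | nil => simp
  | cons v t ih =>
      by_cases hv : v = 1
      · simp [hv]
      · have hvb : ((v == (1 : Int)) = false) := by simpa using hv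
        simp [hvb, ih, onesRuns, hv]

lemma dropNonOnes_head (line : List Int) : ∀ x xs,
    line.dropWhile (fun v => !(v == 1)) = x :: xs → x = 1 := by
  induction line with
  | nil => intro x xs h; simp at h
  | cons v t ih =>
      intro x xs h
      by_cases hv : v = 1
      · rw [List.dropWhile_cons, if_neg (by simp [hv])] at h
        cases h; exact hv
      · rw [List.dropWhile_cons, if_pos (by simpa using hv)] at h
        exact ih x xs h

lemma onesRuns_nil_iff (line : List Int) :
    onesRuns 0 line = [] ↔ line.contains 1 = false := by
  induction line with
  | nil => simp [onesRuns]
  | cons v t ih =>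
      by_cases hv : v = 1
      · subst hv
        rw [onesRuns, if_pos rfl, show ((0:Int)+1) = 1 by norm_num, onesRuns_pos t 1 (by omega)]
        simp
      · simp [onesRuns, hv, ih]
        exact fun _ e => hv e.symm

lemma matchRuns_eq (clue : List Int) : ∀ line,
    matchRuns line clue = (onesRuns 0 line == clue) := by
  induction clue with
  | nil =>
      intro line
      rw [matchRuns, ← onesRuns_dropNonOnes line]
      cases h : line.dropWhile (fun v => !(v == 1)) with
      | nil => simp [onesRuns]
      | cons x xs =>
          have hx := dropNonOnes_head line x xs h
          subst hx
          rw [onesRuns, if_pos rfl, show ((0:Int)+1) = 1 by norm_num, onesRuns_pos xs 1 (by omega)]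
          simp
  | cons c cs ih =>
      intro line
      rw [matchRuns, ← onesRuns_dropNonOnes line]
      cases h : line.dropWhile (fun v => !(v == 1)) with
      | nil => simp [onesRuns]
      | cons x xs =>
          have hx := dropNonOnes_head line x xs h
          subst hx
          rw [onesRuns, if_pos rfl, show ((0:Int)+1) = 1 by norm_num, onesRuns_pos xs 1 (by omega)]
          simp only [List.isEmpty_cons, if_neg, Bool.false_eq_true, not_false_eq_true,
            List.takeWhile_cons, List.dropWhile_cons, beq_self_eq_true, if_pos,
            List.length_cons, List.cons_beq_cons, ih]
          congr 2
          push_cast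
          ring

lemma beq_symm {α : Type} [BEq α] [LawfulBEq α] (a b : α) : (a == b) = (b == a) := by
  by_cases h : a = b
  · simp [h]
  · simp [h, Ne.symm h]

-- ===== VERDICT (by name: the statement is the Claim_ definition above) =====
theorem check_line_py_spec : Claim_equal_check_line_py := by
  intro player_line clue _
  unfold Spec_check_line_py check_line_py check_line_py_alt
  have h := foldA_eq_onesRuns player_line [] 0
  simp only [List.nil_append] at h
  simp only [h, matchRuns_eq]
  by_cases hc : player_line.contains 1 = false
  · have h0 : onesRuns 0 player_line = [] := (onesRuns_nil_iff player_line).mpr hc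
    simp only [h0, if_pos, hc, Bool.not_false]
    exact beq_symm _ _
  · have hne : ¬ onesRuns 0 player_line = [] := fun e => hc ((onesRuns_nil_iff player_line).mp e)
    have hmem : (1 : Int) ∈ player_line := by
      have hct : player_line.contains 1 = true := by simpa using hc
      simpa using hct
    simp [hne, hmem]
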